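-- pv_equiv track=rewrite | github.com/jalagus/lyricthon | cc.py | ngrams
-- ===== SOURCE A (Python) =====
-- from collections import defaultdict
--
-- def ngrams(l, n):
-- 	n += 1
-- 	di = defaultdict(int)
-- 	dp = {}
-- 	for ngram in [tuple(l[i:i+n]) for (i, value) in enumerate(l[:-(n-1)])]:
-- 		di[ngram] += 1
-- 	for ngram in di.keys():
-- 		if ngram[:n-1] not in dp:
-- 			dp[ngram[:n-1]] = []
-- 		dp[ngram[:n-1]] += [ (ngram[-1], di[ngram]) ]
-- 	return dp
-- ===== SOURCE B (Python) =====
-- def ngrams(l, n):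
--     grouped = {}
--     for i, token in enumerate(l[n:]):
--         prefix = tuple(l[i:i+n])
--         bucket = grouped.setdefault(prefix, {})
--         bucket[token] = bucket.get(token, 0) + 1
--     return {prefix: list(counts.items()) for prefix, counts in grouped.items()}
-- ===== Notes on version B (the rewrite author's own statement) =====
-- stated objective: simpler
-- what changed: One pass that groups into a nested dict (prefix -> token -> count) while scanning, replacing A's two staged passes (flat ngram counter, then a regrouping loop that re-slices every ngram); Pre_ excludes negative n, on which A raises IndexError for any nonempty list.
-- intended difference: For n = 0 and nonempty l, A returns {} because its slice l[:-(n-1)] becomes l[:-0] = l[:0], an off-by-one in the negative slice bound; B returns the unigram counts grouped under the empty prefix, the intended 0-context count. — e.g. on ngrams(["a", "b"], 0): A returns [], B returns [([], [("a", 1), ("b", 1)])]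
import Mathlib
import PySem

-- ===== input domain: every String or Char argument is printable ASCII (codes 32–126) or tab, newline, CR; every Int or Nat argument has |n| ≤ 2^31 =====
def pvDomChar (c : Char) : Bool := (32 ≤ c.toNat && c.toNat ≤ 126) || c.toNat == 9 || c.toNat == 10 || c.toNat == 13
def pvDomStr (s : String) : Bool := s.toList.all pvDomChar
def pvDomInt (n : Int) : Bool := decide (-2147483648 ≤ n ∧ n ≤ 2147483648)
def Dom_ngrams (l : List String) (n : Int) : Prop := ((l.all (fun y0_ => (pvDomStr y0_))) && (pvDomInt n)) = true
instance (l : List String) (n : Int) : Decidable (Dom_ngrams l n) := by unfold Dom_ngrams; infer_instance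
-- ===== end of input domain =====

-- B replaces A's two staged passes (flat n-gram counter, then a regrouping loop) by one
-- pass grouping into a nested dict prefix -> token -> count; for n = 0 (nonempty l) B
-- returns the unigram counts under the empty prefix where A's l[:-0] slice yields {}.

-- ===== PORT A =====
def ngrams (l : List String) (n : Int) : List (List String × List (String × Int)) :=
  let n := n + 1
  let grams : List (List String) :=
    (PySem.List.enumerate (PySem.List.slice l none (some (-(n - 1))))).map
      (fun iv => PySem.List.slice l (some iv.1) (some (iv.1 + n)))
  let di : PySem.Dict (List String) Int :=
    grams.foldl (fun d g => d.modify g 0 (· + 1)) PySem.Dict.empty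
  let dp : PySem.Dict (List String) (List (String × Int)) :=
    di.keys.foldl (fun dp g =>
      let key := PySem.List.slice g none (some (n - 1))
      let dp := if dp.contains key then dp else dp.insert key []
      dp.insert key (dp.getD key [] ++ [(PySem.List.pyGetD g (-1) "", di.getD g 0)]))
      PySem.Dict.empty
  dp.items

-- ===== PORT B =====
def ngrams_alt (l : List String) (n : Int) : List (List String × List (String × Int)) :=
  let grouped : PySem.Dict (List String) (PySem.Dict String Int) :=
    (PySem.List.enumerate (PySem.List.slice l (some n) none)).foldl
      (fun g it =>
        let pfx := PySem.List.slice l (some it.1) (some (it.1 + n))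
        let g := g.setdefault pfx PySem.Dict.empty
        let bucket := g.getD pfx PySem.Dict.empty
        g.insert pfx (bucket.insert it.2 (bucket.getD it.2 0 + 1)))
      PySem.Dict.empty
  grouped.items.map (fun pc => (pc.1, pc.2.items))

-- ===== PRECONDITION & SPEC =====
-- Pre_ excludes negative n: there A raises IndexError (ngram[-1] on the empty tuple) for
-- every nonempty l; the empty l is kept inside Pre_ for every n.
def Pre_ngrams (l : List String) (n : Int) : Prop := 0 ≤ n ∨ l = []
instance (l : List String) (n : Int) : Decidable (Pre_ngrams l n) := by unfold Pre_ngrams; infer_instance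
def pvWitness_ngrams : List String × Int := (["a", "b", "a", "b"], 1)

-- For n = 0 and nonempty l, A returns {} because its slice l[:-(n-1)] becomes l[:-0] = l[:0],
-- an off-by-one in the negative slice bound; B returns the unigram counts grouped under the
-- empty prefix, the intended 0-context count.
def D_ngrams (l : List String) (n : Int) : Prop := n = 0 ∧ l ≠ []
instance (l : List String) (n : Int) : Decidable (D_ngrams l n) := by unfold D_ngrams; infer_instance

def Spec_ngrams (l : List String) (n : Int) (out : List (List String × List (String × Int))) : Prop := ¬ D_ngrams l n → out = ngrams_alt l n
instance (l : List String) (n : Int) (out : List (List String × List (String × Int))) : Decidable (Spec_ngrams l n out) := by unfold Spec_ngrams; infer_instance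

def pvDiffWitness_ngrams : List String × Int := (["a", "b"], 0)
def pvDiffWitnessOut_ngrams : (List (List String × List (String × Int))) × (List (List String × List (String × Int))) :=
  ([], [([], [("a", 1), ("b", 1)])])

-- ===== CLAIM (what is proved, stated in full; the proofs are below) =====
def Claim_unchanged_ngrams : Prop := ∀ (l : List String) (n : Int), Dom_ngrams l n → Pre_ngrams l n → Spec_ngrams l n (ngrams l n)
def Claim_changed_ngrams : Prop := Dom_ngrams (pvDiffWitness_ngrams.1) (pvDiffWitness_ngrams.2) ∧ Pre_ngrams (pvDiffWitness_ngrams.1) (pvDiffWitness_ngrams.2) ∧ D_ngrams (pvDiffWitness_ngrams.1) (pvDiffWitness_ngrams.2) ∧ ngrams (pvDiffWitness_ngrams.1) (pvDiffWitness_ngrams.2) = pvDiffWitnessOut_ngrams.1 ∧ ngrams_alt (pvDiffWitness_ngrams.1) (pvDiffWitness_ngrams.2) = pvDiffWitnessOut_ngrams.2 ∧ pvDiffWitnessOut_ngrams.1 ≠ pvDiffWitnessOut_ngrams.2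
def Claim_exact_ngrams : Prop := ∀ (l : List String) (n : Int), Dom_ngrams l n → Pre_ngrams l n → D_ngrams l n → ngrams l n ≠ ngrams_alt l n

-- ===== LEMMAS AND PROOFS =====

-- prefix and last token of the (m+1)-gram starting at position j
def pvP (l : List String) (m j : Nat) : List String := (l.drop j).take m
def pvT (l : List String) (m j : Nat) : String := l.getD (j + m) ""
def pvJ (l : List String) (m : Nat) (c : List String) : List Nat :=
  (List.range (l.length - m)).filter (fun j => pvP l m j == c)
def pvBucket (l : List String) (m : Nat) (c : List String) : List (String × Int) :=
  (PySem.Set.ofList ((pvJ l m c).map (pvT l m))).map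
    (fun t => (t, (((pvJ l m c).map (pvT l m)).count t : Int)))
def pvOut (l : List String) (m : Nat) : List (List String × List (String × Int)) :=
  (PySem.Set.ofList ((List.range (l.length - m)).map (pvP l m))).map (fun c => (c, pvBucket l m c))

theorem pv_enum_eq (xs : List String) : ∀ (s : Int),
    PySem.List.enumerate xs s
      = (List.range xs.length).map (fun j => (s + (j : Nat), xs.getD j "")) := by
  induction xs with
  | nil => intro s; simp [PySem.List.enumerate]
  | cons x xs ih =>
    intro s
    rw [PySem.List.enumerate_cons, ih (s + 1), List.length_cons, List.range_succ_eq_map]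
    simp only [List.map_cons, Nat.cast_zero, add_zero, List.getD_cons_zero, List.map_map]
    refine congrArg (List.cons (s, x)) (List.map_congr_left fun j hj => ?_)
    simp only [Function.comp, Nat.succ_eq_add_one, List.getD_cons_succ]
    congr 1
    push_cast
    ring

theorem pv_ofList_filter {α : Type} [BEq α] [LawfulBEq α] (q : α → Bool) (xs : List α) :
    (PySem.Set.ofList xs).filter q = PySem.Set.ofList (xs.filter q) := by
  induction xs using List.reverseRecOn with
  | nil => simp
  | append_singleton xs x ih =>
    rw [PySem.Set.ofList_append_singleton, List.filter_append]
    cases hq : q x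
    · simp only [List.filter_cons, hq, Bool.false_eq_true, if_false, List.filter_nil,
        List.append_nil]
      by_cases hx : x ∈ xs
      · rw [PySem.Set.add_of_mem ((PySem.Set.mem_ofList xs x).mpr hx), ih]
      · rw [PySem.Set.add_of_not_mem (fun h => hx ((PySem.Set.mem_ofList xs x).mp h)),
          List.filter_append, ih]
        simp [hq]
    · simp only [List.filter_cons, hq, if_true, List.filter_nil]
      rw [PySem.Set.ofList_append_singleton]
      by_cases hx : x ∈ xs
      · rw [PySem.Set.add_of_mem ((PySem.Set.mem_ofList xs x).mpr hx), ih,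
          PySem.Set.add_of_mem ((PySem.Set.mem_ofList _ x).mpr (List.mem_filter.mpr ⟨hx, hq⟩))]
      · rw [PySem.Set.add_of_not_mem (fun h => hx ((PySem.Set.mem_ofList xs x).mp h)),
          List.filter_append, ih,
          PySem.Set.add_of_not_mem (fun h => hx (List.mem_filter.mp ((PySem.Set.mem_ofList _ x).mp h)).1)]
        simp [hq]

theorem pv_ofList_map_ofList {α β : Type} [BEq α] [LawfulBEq α] [BEq β] [LawfulBEq β]
    (f : α → β) (xs : List α) :
    PySem.Set.ofList ((PySem.Set.ofList xs).map f) = PySem.Set.ofList (xs.map f) := by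
  induction xs using List.reverseRecOn with
  | nil => simp
  | append_singleton xs x ih =>
    rw [PySem.Set.ofList_append_singleton, List.map_append, List.map_singleton,
      PySem.Set.ofList_append_singleton]
    by_cases hx : x ∈ xs
    · rw [PySem.Set.add_of_mem ((PySem.Set.mem_ofList xs x).mpr hx), ih,
        PySem.Set.add_of_mem ((PySem.Set.mem_ofList _ (f x)).mpr (List.mem_map_of_mem hx))]
    · rw [PySem.Set.add_of_not_mem (fun h => hx ((PySem.Set.mem_ofList xs x).mp h)),
        List.map_append, List.map_singleton, PySem.Set.ofList_append_singleton, ih]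

theorem pv_ofList_map_inj {α β : Type} [BEq α] [LawfulBEq α] [BEq β] [LawfulBEq β]
    (f : α → β) (hf : ∀ a b, f a = f b → a = b) (xs : List α) :
    PySem.Set.ofList (xs.map f) = (PySem.Set.ofList xs).map f := by
  induction xs using List.reverseRecOn with
  | nil => simp
  | append_singleton xs x ih =>
    rw [List.map_append, List.map_singleton, PySem.Set.ofList_append_singleton,
      PySem.Set.ofList_append_singleton, ih]
    by_cases hx : x ∈ xs
    · rw [PySem.Set.add_of_mem ((PySem.Set.mem_ofList xs x).mpr hx),
        PySem.Set.add_of_mem (List.mem_map_of_mem ((PySem.Set.mem_ofList xs x).mpr hx))]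
    · have h1 : x ∉ PySem.Set.ofList xs := fun h => hx ((PySem.Set.mem_ofList xs x).mp h)
      have h2 : f x ∉ (PySem.Set.ofList xs).map f := by
        intro h
        obtain ⟨a, ha, hfa⟩ := List.mem_map.mp h
        exact h1 (hf a x hfa ▸ ha)
      rw [PySem.Set.add_of_not_mem h1, PySem.Set.add_of_not_mem h2, List.map_append,
        List.map_singleton]

theorem pv_getD_foldl_insert {κ ν α : Type} [BEq κ] [LawfulBEq κ] [DecidableEq κ]
    (key : α → κ) (f : α → ν → ν) (d0 : ν) (c : κ) :
    ∀ (l : List α) (d : PySem.Dict κ ν),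
    (l.foldl (fun d a => d.insert (key a) (f a (d.getD (key a) d0))) d).getD c d0
      = (l.filter (fun a => key a == c)).foldl (fun v a => f a v) (d.getD c d0) := by
  intro l
  induction l with
  | nil => intro d; simp
  | cons a l ih =>
    intro d
    rw [List.foldl_cons, ih, List.filter_cons]
    by_cases h : key a = c
    · rw [if_pos (by simp [h]), List.foldl_cons, PySem.Dict.getD_insert, if_pos h.symm, h]
    · rw [if_neg (by simp [h]), PySem.Dict.getD_insert, if_neg (Ne.symm h)]

theorem pvA_step {κ ν : Type} [BEq κ] [LawfulBEq κ] (d : PySem.Dict κ (List ν)) (k : κ) (x : ν) :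
    (if (d.contains k) = true then d else d.insert k []).insert k
        ((if (d.contains k) = true then d else d.insert k []).getD k [] ++ [x])
      = d.insert k (d.getD k [] ++ [x]) := by
  by_cases h : d.contains k = true
  · rw [if_pos h]
  · rw [if_neg h, PySem.Dict.getD_insert_self, PySem.Dict.insert_insert_self,
      PySem.Dict.getD_of_not_contains d [] (Bool.not_eq_true _ ▸ h)]

theorem pvB_step {κ : Type} [BEq κ] [LawfulBEq κ] (d : PySem.Dict κ (PySem.Dict String Int))
    (k : κ) (t : String) :
    (d.setdefault k PySem.Dict.empty).insert k
        (((d.setdefault k PySem.Dict.empty).getD k PySem.Dict.empty).insert t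
          (((d.setdefault k PySem.Dict.empty).getD k PySem.Dict.empty).getD t 0 + 1))
      = d.insert k ((d.getD k PySem.Dict.empty).insert t ((d.getD k PySem.Dict.empty).getD t 0 + 1)) := by
  by_cases h : d.contains k = true
  · rw [PySem.Dict.setdefault_of_contains d _ h]
  · rw [PySem.Dict.setdefault_of_not_contains d _ (Bool.not_eq_true _ ▸ h),
      PySem.Dict.getD_insert_self, PySem.Dict.insert_insert_self,
      PySem.Dict.getD_of_not_contains d _ (Bool.not_eq_true _ ▸ h)]

theorem pv_count (l : List String) (m : Nat) (c : List String) (t : String) (js : List Nat) :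
    (js.map (fun j => pvP l m j ++ [pvT l m j])).count (c ++ [t])
      = ((js.filter (fun j => pvP l m j == c)).map (pvT l m)).count t := by
  rw [List.count_eq_countP, List.count_eq_countP, List.countP_map, List.countP_map,
    List.countP_filter]
  apply List.countP_congr
  intro j _
  by_cases h1 : pvP l m j = c <;> by_cases h2 : pvT l m j = t <;>
    simp [Function.comp, h1, h2]

theorem pv_nil (n : Int) : ngrams [] n = ngrams_alt [] n := by
  simp [ngrams, ngrams_alt, PySem.List.slice, PySem.Dict.empty]

theorem pv_zero (l : List String) : ngrams l 0 = [] := by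
  simp [ngrams, PySem.List.slice_to, PySem.Dict.empty]


theorem pv_B_fold (l : List String) (m : Nat) (js : List Nat) :
    ((js.foldl (fun g j => g.insert (pvP l m j)
        ((g.getD (pvP l m j) PySem.Dict.empty).insert (pvT l m j)
          ((g.getD (pvP l m j) PySem.Dict.empty).getD (pvT l m j) (0:Int) + 1)))
      PySem.Dict.empty).items).map (fun pc => (pc.1, pc.2.items))
    = (PySem.Set.ofList (js.map (pvP l m))).map (fun c => (c,
        (PySem.Set.ofList ((js.filter (fun j => pvP l m j == c)).map (pvT l m))).map
          (fun t => (t, (((js.filter (fun j => pvP l m j == c)).map (pvT l m)).count t : Int))))) := by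
  have hnd : ((js.foldl (fun g j => g.insert (pvP l m j)
        ((g.getD (pvP l m j) PySem.Dict.empty).insert (pvT l m j)
          ((g.getD (pvP l m j) PySem.Dict.empty).getD (pvT l m j) (0:Int) + 1)))
      PySem.Dict.empty).keys).Nodup := by
    apply PySem.Dict.nodup_keys_foldl_insert_key js (pvP l m)
    rw [PySem.Dict.keys_empty]
    exact List.nodup_nil
  have hkeys : ((js.foldl (fun g j => g.insert (pvP l m j)
        ((g.getD (pvP l m j) PySem.Dict.empty).insert (pvT l m j)
          ((g.getD (pvP l m j) PySem.Dict.empty).getD (pvT l m j) (0:Int) + 1)))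
      PySem.Dict.empty).keys) = PySem.Set.ofList (js.map (pvP l m)) := by
    refine (PySem.Dict.keys_foldl_insert_key js (pvP l m)
      (fun g j => (g.getD (pvP l m j) PySem.Dict.empty).insert (pvT l m j)
        ((g.getD (pvP l m j) PySem.Dict.empty).getD (pvT l m j) (0:Int) + 1)) PySem.Dict.empty).trans ?_
    rw [PySem.Dict.keys_empty]
    exact PySem.Set.update_nil_left _
  refine (congrArg (List.map (fun pc : (List String) × PySem.Dict String Int => (pc.1, pc.2.items)))
    (PySem.Dict.items_eq_map_keys _ hnd PySem.Dict.empty)).trans ?_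
  rw [List.map_map, hkeys]
  refine List.map_congr_left fun c hc => ?_
  have h2c : ((js.foldl (fun g j => g.insert (pvP l m j)
        ((g.getD (pvP l m j) PySem.Dict.empty).insert (pvT l m j)
          ((g.getD (pvP l m j) PySem.Dict.empty).getD (pvT l m j) (0:Int) + 1)))
      PySem.Dict.empty).getD c PySem.Dict.empty)
      = PySem.Dict.counter ((js.filter (fun j => pvP l m j == c)).map (pvT l m)) := by
    refine (pv_getD_foldl_insert (pvP l m)
      (fun j (b : PySem.Dict String Int) => b.insert (pvT l m j) (b.getD (pvT l m j) (0:Int) + 1)) PySem.Dict.empty c js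
      PySem.Dict.empty).trans ?_
    exact (List.foldl_map (f := pvT l m)
      (g := fun (b : PySem.Dict String Int) t => b.insert t (b.getD t 0 + 1))).symm.trans
      (PySem.Dict.foldl_insert_getD_add_one_eq_counter _)
  exact congrArg (Prod.mk c) ((congrArg PySem.Dict.items h2c).trans (PySem.Dict.items_counter _))

theorem pv_B (l : List String) (m : Nat) : ngrams_alt l (m : Int) = pvOut l m := by
  have hgd : ∀ j : Nat, (l.drop m).getD j "" = pvT l m j := by
    intro j
    simp [pvT, List.getD_eq_getElem?_getD, List.getElem?_drop, Nat.add_comm]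
  simp only [ngrams_alt, PySem.List.slice_from_natCast, pv_enum_eq, List.length_drop,
    List.foldl_map, zero_add, hgd, PySem.List.slice_natCast_add, pvB_step,
    show ∀ j : Nat, List.take m (List.drop j l) = pvP l m j from fun j => rfl]
  refine (pv_B_fold l m (List.range (l.length - m))).trans ?_
  simp only [pvOut, pvBucket, pvJ]

theorem pv_alt_zero_ne (l : List String) (hl : l ≠ []) : ngrams_alt l 0 ≠ [] := by
  have h0 : (0:Int) = ((0:Nat):Int) := rfl
  rw [h0, pv_B l 0]
  simp only [pvOut]
  intro h
  rw [List.map_eq_nil_iff] at h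
  have hmem : pvP l 0 0 ∈ PySem.Set.ofList ((List.range (l.length - 0)).map (pvP l 0)) := by
    rw [PySem.Set.mem_ofList]
    refine List.mem_map_of_mem (List.mem_range.mpr ?_)
    cases l with
    | nil => exact absurd rfl hl
    | cons a t => simp
  rw [h] at hmem
  exact absurd hmem List.not_mem_nil

theorem pv_A_fold (gs : List (List String)) (m : Nat) :
    ((PySem.Set.ofList gs).foldl (fun dp g => dp.insert (g.take m)
        (dp.getD (g.take m) [] ++ [(PySem.List.pyGetD g (-1) "", (gs.count g : Int))]))
      PySem.Dict.empty).items
    = (PySem.Set.ofList ((PySem.Set.ofList gs).map (fun g => g.take m))).map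
        (fun c => (c, ((PySem.Set.ofList gs).filter (fun g => g.take m == c)).map
          (fun g => (PySem.List.pyGetD g (-1) "", (gs.count g : Int))))) := by
  have hnd : (((PySem.Set.ofList gs).foldl (fun dp g => dp.insert (g.take m)
        (dp.getD (g.take m) [] ++ [(PySem.List.pyGetD g (-1) "", (gs.count g : Int))]))
      PySem.Dict.empty).keys).Nodup := by
    apply PySem.Dict.nodup_keys_foldl_insert_key (PySem.Set.ofList gs) (fun g => g.take m)
    rw [PySem.Dict.keys_empty]
    exact List.nodup_nil
  have hkeys : (((PySem.Set.ofList gs).foldl (fun dp g => dp.insert (g.take m)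
        (dp.getD (g.take m) [] ++ [(PySem.List.pyGetD g (-1) "", (gs.count g : Int))]))
      PySem.Dict.empty).keys)
      = PySem.Set.ofList ((PySem.Set.ofList gs).map (fun g => g.take m)) := by
    refine (PySem.Dict.keys_foldl_insert_key (PySem.Set.ofList gs) (fun g => g.take m)
      (fun dp g => dp.getD (g.take m) [] ++ [(PySem.List.pyGetD g (-1) "", (gs.count g : Int))])
      PySem.Dict.empty).trans ?_
    rw [PySem.Dict.keys_empty]
    exact PySem.Set.update_nil_left _
  refine (PySem.Dict.items_eq_map_keys _ hnd []).trans ?_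
  rw [hkeys]
  refine List.map_congr_left fun c hc => ?_
  have h2c : (((PySem.Set.ofList gs).foldl (fun dp g => dp.insert (g.take m)
        (dp.getD (g.take m) [] ++ [(PySem.List.pyGetD g (-1) "", (gs.count g : Int))]))
      PySem.Dict.empty).getD c [])
      = ((PySem.Set.ofList gs).filter (fun g => g.take m == c)).map
          (fun g => (PySem.List.pyGetD g (-1) "", (gs.count g : Int))) := by
    refine (pv_getD_foldl_insert (fun g => g.take m)
      (fun g (v : List (String × Int)) => v ++ [(PySem.List.pyGetD g (-1) "", (gs.count g : Int))]) [] c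
      (PySem.Set.ofList gs) PySem.Dict.empty).trans ?_
    refine (PySem.List.foldl_append_singleton_eq_map _ _ _).trans ?_
    rw [PySem.Dict.getD_empty]
    exact List.nil_append _
  exact congrArg (Prod.mk c) h2c

theorem pv_A (l : List String) (m : Nat) (hm : 0 < m) : ngrams l (m : Int) = pvOut l m := by
  have e1 : (m:Int) + 1 - 1 = (m:Int) := by ring
  have e2 : (l.take (l.length - m)).length = l.length - m := by
    rw [List.length_take]; omega
  have hgram : ∀ j ∈ List.range (l.length - m),
      PySem.List.slice l (some ((j:Nat):Int)) (some (((j:Nat):Int) + ((m:Int)+1)))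
        = pvP l m j ++ [pvT l m j] := by
    intro j hj
    have hj' : j < l.length - m := List.mem_range.mp hj
    have ec : ((j:Int) + ((m:Int)+1)) = ((j:Int) + ((m+1 : Nat):Int)) := by push_cast; ring
    rw [ec, PySem.List.slice_natCast_add, List.take_add_one, pvP]
    congr 1
    rw [List.getElem?_drop, List.getElem?_eq_getElem (by omega)]
    simp [pvT, List.getD_eq_getElem?_getD, List.getElem?_eq_getElem (show j + m < l.length by omega)]
  simp only [ngrams, e1, PySem.List.slice_to_neg_natCast l m hm, pv_enum_eq, e2,
    List.map_map, Function.comp_def, zero_add]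
  rw [List.map_congr_left hgram, ← PySem.Dict.counter_eq_foldl, PySem.Dict.keys_counter]
  simp only [PySem.Dict.getD_counter, PySem.List.slice_to_natCast, pvA_step]
  refine (pv_A_fold ((List.range (l.length - m)).map (fun j => pvP l m j ++ [pvT l m j])) m).trans ?_
  rw [pv_ofList_map_ofList, List.map_map]
  simp only [Function.comp_def]
  have hkeyA : ∀ j ∈ List.range (l.length - m),
      (pvP l m j ++ [pvT l m j]).take m = pvP l m j := by
    intro j hj
    have hj' : j < l.length - m := List.mem_range.mp hj
    refine List.take_left' ?_
    simp only [pvP, List.length_take, List.length_drop]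
    omega
  rw [List.map_congr_left hkeyA]
  simp only [pvOut]
  refine List.map_congr_left fun c hc => ?_
  refine congrArg (Prod.mk c) ?_
  simp only [pvBucket, pvJ]
  rw [pv_ofList_filter, List.filter_map]
  have hfc : ∀ j ∈ List.range (l.length - m),
      ((fun (g : List String) => g.take m == c) ∘ (fun j => pvP l m j ++ [pvT l m j])) j
        = (pvP l m j == c) := by
    intro j hj
    have hj' : j < l.length - m := List.mem_range.mp hj
    simp only [Function.comp_def]
    rw [List.take_left' (by simp only [pvP, List.length_take, List.length_drop]; omega)]
  rw [List.filter_congr hfc]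
  have hjc : ∀ j ∈ (List.range (l.length - m)).filter (fun j => pvP l m j == c),
      pvP l m j ++ [pvT l m j] = c ++ [pvT l m j] := by
    intro j hj
    rw [eq_of_beq (List.mem_filter.mp hj).2]
  rw [List.map_congr_left hjc,
    show (fun j => c ++ [pvT l m j]) = ((fun t => c ++ [t]) ∘ pvT l m) from rfl,
    ← List.map_map, pv_ofList_map_inj (fun t => c ++ [t])
      (fun a b h => by simpa using List.append_cancel_left h),
    List.map_map]
  simp only [Function.comp_def]
  refine List.map_congr_left fun t ht => ?_
  rw [PySem.List.pyGetD_neg_one_append_singleton, pv_count l m c t (List.range (l.length - m))]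


theorem pv_main (l : List String) (n : Int) (hn : 0 < n) : ngrams l n = ngrams_alt l n := by
  have h : n = ((n.toNat : Nat) : Int) := (Int.toNat_of_nonneg (le_of_lt hn)).symm
  rw [h, pv_A l n.toNat (by omega), pv_B l n.toNat]

-- ===== VERDICT (by name: the statement is the Claim_ definition above) =====
theorem ngrams_spec : Claim_unchanged_ngrams := by
  intro l n hdom hpre hD
  by_cases hl : l = []
  · subst hl; exact pv_nil n
  · have hn0 : n ≠ 0 := fun h => hD ⟨h, hl⟩
    have hpos : 0 < n := by
      rcases hpre with h | h
      · omega
      · exact absurd h hl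
    exact pv_main l n hpos
theorem ngrams_changed : Claim_changed_ngrams := by unfold Claim_changed_ngrams; decide
theorem ngrams_tight : Claim_exact_ngrams := by
  intro l n hdom hpre hD
  obtain ⟨hn, hl⟩ := hD
  subst hn
  rw [pv_zero]
  exact fun h => pv_alt_zero_ne l hl h.symm
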